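-- pv_equiv track=rewrite | github.com/davrikn/ASL_classifier | GUI_CV.py | change_format
-- ===== SOURCE A (Python) =====
-- def change_format(frame):#Redundant function to change format of image array. Use transpose instead...
--     """Changes format from webcam: [[[r,g,b],[r,g,b]][[r,g,b]]]
--     to correct format: [[[r,200,r],[r,200,r]], [[b,200,b],[b,200,b]], [[g,200,c],...,[c,200,c]]]"""
--     r_verdier=[]
--     g_verdier=[]
--     b_verdier=[]
--     r_verdier_temp=[]
--     g_verdier_temp=[]
--     b_verdier_temp=[]
--     counter=0
--     g_counter=0
--     b_counter=0
--     for i in range(len(frame)):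
--         for j in range(len(frame[i])):
--
--             r_verdier_temp.append(frame[i][j][0])
--             g_verdier_temp.append(frame[i][j][1])
--             b_verdier_temp.append(frame[i][j][2])
--             counter+=1
--             if counter==200:#200
--                 r_verdier.append(r_verdier_temp)
--                 g_verdier.append(g_verdier_temp)
--                 b_verdier.append(b_verdier_temp)
--                 counter=0
--                 r_verdier_temp=[]
--                 g_verdier_temp=[]
--                 b_verdier_temp=[]
--
--     final=[[],[],[]]
--     for i in range(len(r_verdier)):#number of lists?
--         final[0].append(r_verdier[i])
--         final[1].append(g_verdier[i])
--         final[2].append(b_verdier[i])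
--
--     return final
-- ===== SOURCE B (Python) =====
-- def change_format(frame):
--     # Flatten to a row-major pixel list, project the three channels into flat
--     # lists, then slice complete 200-length chunks off each (no counter/flush
--     # bookkeeping, no second rearrangement pass).
--     pixels = [px for row in frame for px in row]
--     r = [p[0] for p in pixels]
--     g = [p[1] for p in pixels]
--     b = [p[2] for p in pixels]
--     rs, gs, bs = [], [], []
--     while len(r) >= 200:
--         rs.append(r[:200])
--         r = r[200:]
--         gs.append(g[:200])
--         g = g[200:]
--         bs.append(b[:200])
--         b = b[200:]
--     return [rs, gs, bs]
-- ===== Notes on version B (the rewrite author's own statement) =====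
-- stated objective: simpler
-- what changed: B flattens the frame into one row-major pixel list, then repeatedly slices off complete 200-pixel chunks and splits each chunk into its three channels, replacing A's interleaved counter/flush bookkeeping and its redundant second rearrangement loop.
import Mathlib
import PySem

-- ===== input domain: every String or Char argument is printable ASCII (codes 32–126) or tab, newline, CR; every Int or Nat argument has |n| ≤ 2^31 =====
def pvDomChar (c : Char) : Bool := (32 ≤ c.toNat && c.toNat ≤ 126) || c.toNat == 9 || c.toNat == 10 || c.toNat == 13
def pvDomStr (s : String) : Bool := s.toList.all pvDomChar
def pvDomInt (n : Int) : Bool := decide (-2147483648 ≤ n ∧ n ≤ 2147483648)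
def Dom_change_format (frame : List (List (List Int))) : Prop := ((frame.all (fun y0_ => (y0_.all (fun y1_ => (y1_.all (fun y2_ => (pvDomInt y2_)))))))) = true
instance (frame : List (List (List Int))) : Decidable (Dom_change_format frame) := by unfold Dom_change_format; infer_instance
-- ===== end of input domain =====

-- B changes the decomposition for simplicity: flatten to a pixel list, slice off complete 200-pixel chunks, split each chunk into channels (no counter/flush, no second rearrangement pass).

-- ===== PORT A =====
-- state: (r_verdier, g_verdier, b_verdier, r_temp, g_temp, b_temp, counter)
abbrev pvAState := List (List Int) × List (List Int) × List (List Int) × List Int × List Int × List Int × Int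

-- body of A's inner pixel loop (px = frame[i][j]); px[c] ported as pyGet? with
-- default 0 — exact on Pre_ (every pixel has ≥ 3 values, so pyGet? is `some`)
-- Python appends px[c] to the temps and increments counter, then tests
-- counter == 200; the updated temps/counter are written out in both branches
def pvStepA (s : pvAState) (px : List Int) : pvAState :=
  if s.2.2.2.2.2.2 + 1 == 200 then
    (s.1 ++ [s.2.2.2.1 ++ [(PySem.List.pyGet? px 0).getD 0]],
     s.2.1 ++ [s.2.2.2.2.1 ++ [(PySem.List.pyGet? px 1).getD 0]],
     s.2.2.1 ++ [s.2.2.2.2.2.1 ++ [(PySem.List.pyGet? px 2).getD 0]],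
     ([] : List Int), ([] : List Int), ([] : List Int), (0 : Int))
  else
    (s.1, s.2.1, s.2.2.1,
     s.2.2.2.1 ++ [(PySem.List.pyGet? px 0).getD 0],
     s.2.2.2.2.1 ++ [(PySem.List.pyGet? px 1).getD 0],
     s.2.2.2.2.2.1 ++ [(PySem.List.pyGet? px 2).getD 0],
     s.2.2.2.2.2.2 + 1)

def change_format (frame : List (List (List Int))) : List (List (List Int)) :=
  -- for i in range(len(frame)): for j in range(len(frame[i])): …
  let s : pvAState := frame.foldl (fun acc row => row.foldl pvStepA acc) ([], [], [], [], [], [], 0)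
  let r := s.1
  let g := s.2.1
  let b := s.2.2.1
  -- final=[[],[],[]]; for i in range(len(r_verdier)): final[c].append(…[i])
  let final : List (List Int) × List (List Int) × List (List Int) :=
    (List.range r.length).foldl (fun (f : List (List Int) × List (List Int) × List (List Int)) (i : Nat) =>
      (f.1 ++ [(PySem.List.pyGet? r (i : Int)).getD []],
       f.2.1 ++ [(PySem.List.pyGet? g (i : Int)).getD []],
       f.2.2 ++ [(PySem.List.pyGet? b (i : Int)).getD []])) ([], [], [])
  [final.1, final.2.1, final.2.2]

-- ===== PORT B =====
-- the while loop of Source B: rs.append(r[:200]); r = r[200:]  (same for g, b)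
def pvBLoop (r g b : List Int) (rs gs bs : List (List Int)) : List (List Int) × List (List Int) × List (List Int) :=
  if _h : 200 ≤ r.length then
    pvBLoop (PySem.List.slice r (some 200) none) (PySem.List.slice g (some 200) none)
      (PySem.List.slice b (some 200) none)
      (rs ++ [PySem.List.slice r none (some 200)])
      (gs ++ [PySem.List.slice g none (some 200)])
      (bs ++ [PySem.List.slice b none (some 200)])
  else (rs, gs, bs)
termination_by r.length
decreasing_by
  have hs : PySem.List.slice r (some 200) none = r.drop 200 := by
    have := PySem.List.slice_from (xs := r) (a := 200) (by norm_num)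
    simpa using this
  simp only [hs, List.length_drop]
  omega

def change_format_alt (frame : List (List (List Int))) : List (List (List Int)) :=
  let pixels := frame.flatMap (fun row => row)
  -- r = [p[0] for p in pixels], g = [p[1] …], b = [p[2] …]
  let r := pixels.map (fun p => (PySem.List.pyGet? p 0).getD 0)
  let g := pixels.map (fun p => (PySem.List.pyGet? p 1).getD 0)
  let b := pixels.map (fun p => (PySem.List.pyGet? p 2).getD 0)
  let res := pvBLoop r g b [] [] []
  [res.1, res.2.1, res.2.2]

-- ===== PRECONDITION & SPEC =====
-- Pre_ excludes exactly the inputs on which Python A raises IndexError: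
-- some pixel frame[i][j] has fewer than 3 values.
def Pre_change_format (frame : List (List (List Int))) : Prop :=
  ∀ row ∈ frame, ∀ px ∈ row, 3 ≤ px.length
instance (frame : List (List (List Int))) : Decidable (Pre_change_format frame) := by unfold Pre_change_format; infer_instance
def pvWitness_change_format : List (List (List Int)) := [[[1, 2, 3], [4, 5, 6]], [[7, 8, 9]]]

def Spec_change_format (frame : List (List (List Int))) (out : List (List (List Int))) : Prop := out = change_format_alt frame
instance (frame : List (List (List Int))) (out : List (List (List Int))) : Decidable (Spec_change_format frame out) := by unfold Spec_change_format; infer_instance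

-- ===== CLAIM (what is proved, stated in full; the proofs are below) =====
def Claim_equal_change_format : Prop := ∀ (frame : List (List (List Int))), Dom_change_format frame → Pre_change_format frame → Spec_change_format frame (change_format frame)

-- ===== LEMMAS AND PROOFS =====

-- channel projection of a pixel list
def pvChan (c : Int) (ps : List (List Int)) : List Int :=
  ps.map (fun p => (PySem.List.pyGet? p c).getD 0)

-- the complete 200-chunks of ps, channel-projected
def pvChunks (c : Int) (ps : List (List Int)) : List (List Int) :=
  (List.range (ps.length / 200)).map (fun i => pvChan c ((ps.drop (200 * i)).take 200))

-- the incomplete trailing part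
def pvTail (ps : List (List Int)) : List (List Int) := ps.drop (200 * (ps.length / 200))

lemma pvChan_append (c : Int) (xs ys : List (List Int)) :
    pvChan c (xs ++ ys) = pvChan c xs ++ pvChan c ys := by
  simp [pvChan]

lemma pvDropTake_append (l : List (List Int)) (p : List Int) (m t : Nat)
    (h : m + t ≤ l.length) :
    ((l ++ [p]).drop m).take t = (l.drop m).take t := by
  rw [List.drop_append_of_le_length (by omega)]
  rw [List.take_append_of_le_length (by simp; omega)]

lemma pvChunks_snoc_eq (c : Int) (l : List (List Int)) (p : List Int)
    (h : ¬ l.length % 200 = 199) :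
    pvChunks c (l ++ [p]) = pvChunks c l := by
  simp only [pvChunks, List.length_append, List.length_cons, List.length_nil]
  rw [show (l.length + (0 + 1)) / 200 = l.length / 200 by omega]
  apply List.map_congr_left
  intro i hi
  simp only [List.mem_range] at hi
  rw [pvDropTake_append]
  have := Nat.div_mul_le_self l.length 200
  omega

lemma pvTail_snoc (l : List (List Int)) (p : List Int)
    (h : ¬ l.length % 200 = 199) :
    pvTail (l ++ [p]) = pvTail l ++ [p] := by
  simp only [pvTail, List.length_append, List.length_cons, List.length_nil]
  rw [show (l.length + (0 + 1)) / 200 = l.length / 200 by omega]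
  rw [List.drop_append_of_le_length (by have := Nat.div_mul_le_self l.length 200; omega)]

lemma pvChunks_snoc_flush (c : Int) (l : List (List Int)) (p : List Int)
    (h : l.length % 200 = 199) :
    pvChunks c (l ++ [p]) =
      pvChunks c l ++ [pvChan c (pvTail l) ++ [(PySem.List.pyGet? p c).getD 0]] := by
  have hmul := Nat.div_mul_le_self l.length 200
  simp only [pvChunks, List.length_append, List.length_cons, List.length_nil]
  rw [show (l.length + (0 + 1)) / 200 = l.length / 200 + 1 by omega]
  rw [List.range_succ, List.map_append]
  congr 1
  · apply List.map_congr_left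
    intro i hi
    simp only [List.mem_range] at hi
    rw [pvDropTake_append]
    omega
  · simp only [List.map_cons, List.map_nil]
    rw [List.drop_append_of_le_length (by omega)]
    rw [List.take_of_length_le (by simp; omega)]
    rw [pvChan_append]
    simp [pvChan, pvTail]

lemma pvTail_snoc_flush (l : List (List Int)) (p : List Int)
    (h : l.length % 200 = 199) :
    pvTail (l ++ [p]) = [] := by
  simp only [pvTail, List.length_append, List.length_cons, List.length_nil]
  rw [show (l.length + (0 + 1)) / 200 = l.length / 200 + 1 by omega]
  apply List.drop_eq_nil_of_le
  simp
  omega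

-- invariant of A's pixel loop
lemma pvFoldA (ps : List (List Int)) :
    ps.foldl pvStepA ([], [], [], [], [], [], 0) =
      (pvChunks 0 ps, pvChunks 1 ps, pvChunks 2 ps,
       pvChan 0 (pvTail ps), pvChan 1 (pvTail ps), pvChan 2 (pvTail ps),
       ((ps.length % 200 : Nat) : Int)) := by
  induction ps using List.reverseRecOn with
  | nil => simp [pvChunks, pvTail, pvChan]
  | append_singleton l p ih =>
    rw [List.foldl_append, ih]
    by_cases h : l.length % 200 = 199
    · have hcond : (((l.length % 200 : Nat) : Int) + 1 == 200) = true := by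
        simp [h]
      simp only [List.foldl_cons, List.foldl_nil, pvStepA, hcond, if_true, Prod.mk.injEq]
      refine ⟨?_, ?_, ?_, ?_, ?_, ?_, ?_⟩
      · rw [pvChunks_snoc_flush 0 l p h]
      · rw [pvChunks_snoc_flush 1 l p h]
      · rw [pvChunks_snoc_flush 2 l p h]
      · rw [pvTail_snoc_flush l p h]; simp [pvChan]
      · rw [pvTail_snoc_flush l p h]; simp [pvChan]
      · rw [pvTail_snoc_flush l p h]; simp [pvChan]
      · simp only [List.length_append, List.length_cons, List.length_nil]
        push_cast
        omega
    · have hcond : (((l.length % 200 : Nat) : Int) + 1 == 200) = false := by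
        have : l.length % 200 < 200 := Nat.mod_lt _ (by omega)
        simp only [beq_eq_false_iff_ne, ne_eq]
        push_cast
        omega
      simp only [List.foldl_cons, List.foldl_nil, pvStepA, hcond, if_false, Bool.false_eq_true, Prod.mk.injEq]
      refine ⟨?_, ?_, ?_, ?_, ?_, ?_, ?_⟩
      · rw [pvChunks_snoc_eq 0 l p h]
      · rw [pvChunks_snoc_eq 1 l p h]
      · rw [pvChunks_snoc_eq 2 l p h]
      · rw [pvTail_snoc l p h, pvChan_append]; simp [pvChan]
      · rw [pvTail_snoc l p h, pvChan_append]; simp [pvChan]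
      · rw [pvTail_snoc l p h, pvChan_append]; simp [pvChan]
      · simp only [List.length_append, List.length_cons, List.length_nil]
        push_cast
        omega

-- A's final rearrangement loop is the identity on three equal-length lists
lemma pvFinalAux (r g b : List (List Int)) (m : Nat) (hm : m ≤ r.length)
    (hg : g.length = r.length) (hb : b.length = r.length) :
    (List.range m).foldl (fun (f : List (List Int) × List (List Int) × List (List Int)) (i : Nat) =>
      (f.1 ++ [(PySem.List.pyGet? r (i : Int)).getD []],
       f.2.1 ++ [(PySem.List.pyGet? g (i : Int)).getD []],
       f.2.2 ++ [(PySem.List.pyGet? b (i : Int)).getD []])) ([], [], []) =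
      (r.take m, g.take m, b.take m) := by
  induction m with
  | zero => simp
  | succ m ih =>
    rw [List.range_succ, List.foldl_append, ih (by omega)]
    simp only [List.foldl_cons, List.foldl_nil, PySem.List.pyGet?_natCast]
    have hr : m < r.length := by omega
    have hg' : m < g.length := by omega
    have hb' : m < b.length := by omega
    rw [List.getElem?_eq_getElem hr, List.getElem?_eq_getElem hg', List.getElem?_eq_getElem hb']
    rw [List.take_add_one, List.take_add_one, List.take_add_one]
    rw [List.getElem?_eq_getElem hr, List.getElem?_eq_getElem hg', List.getElem?_eq_getElem hb']
    simp

lemma pvFinalLoop (r g b : List (List Int))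
    (hg : g.length = r.length) (hb : b.length = r.length) :
    (List.range r.length).foldl (fun (f : List (List Int) × List (List Int) × List (List Int)) (i : Nat) =>
      (f.1 ++ [(PySem.List.pyGet? r (i : Int)).getD []],
       f.2.1 ++ [(PySem.List.pyGet? g (i : Int)).getD []],
       f.2.2 ++ [(PySem.List.pyGet? b (i : Int)).getD []])) ([], [], []) = (r, g, b) := by
  rw [pvFinalAux r g b r.length (le_refl _) hg hb]
  rw [List.take_of_length_le (le_refl _), List.take_of_length_le hg.le, List.take_of_length_le hb.le]

-- generic complete-200-chunk decomposition
def pvChunksG {α : Type} (xs : List α) : List (List α) :=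
  (List.range (xs.length / 200)).map (fun i => (xs.drop (200 * i)).take 200)

lemma pvChunksG_step {α : Type} (xs : List α) (h : 200 ≤ xs.length) :
    pvChunksG xs = xs.take 200 :: pvChunksG (xs.drop 200) := by
  simp only [pvChunksG, List.length_drop]
  rw [show xs.length / 200 = (xs.length - 200) / 200 + 1 by omega]
  rw [List.range_succ_eq_map, List.map_cons, List.map_map]
  refine congrArg₂ (· :: ·) (by simp) ?_
  apply List.map_congr_left
  intro i _
  simp only [Function.comp_apply, List.drop_drop]
  rw [show 200 * (i + 1) = 200 + 200 * i by ring]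

lemma pvChunksG_nil_of_short {α : Type} (xs : List α) (h : xs.length < 200) :
    pvChunksG xs = [] := by
  simp only [pvChunksG]
  rw [show xs.length / 200 = 0 by omega]
  simp

-- chunking the projected channel = projecting the pixel chunks
lemma pvChunks_eq_chunksG (c : Int) (ps : List (List Int)) :
    pvChunks c ps = pvChunksG (pvChan c ps) := by
  simp only [pvChunks, pvChunksG, pvChan, List.length_map]
  apply List.map_congr_left
  intro i _
  simp [List.map_take, List.map_drop]

-- B's while loop computes the chunk decomposition of each channel
lemma pvBLoop_eq : ∀ (r g b : List Int) (rs gs bs : List (List Int)),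
    g.length = r.length → b.length = r.length →
    pvBLoop r g b rs gs bs =
      (rs ++ pvChunksG r, gs ++ pvChunksG g, bs ++ pvChunksG b) := by
  intro r g b rs gs bs
  induction r, g, b, rs, gs, bs using pvBLoop.induct with
  | case1 r g b rs gs bs h ih =>
    intro hg hb
    have hsf : ∀ xs : List Int, PySem.List.slice xs (some 200) none = xs.drop 200 := by
      intro xs
      have := PySem.List.slice_from (xs := xs) (a := 200) (by norm_num)
      simpa using this
    have hst : ∀ xs : List Int, PySem.List.slice xs none (some 200) = xs.take 200 := by
      intro xs
      have := PySem.List.slice_to (xs := xs) (b := 200) (by norm_num)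
      simpa using this
    rw [pvBLoop]
    simp only [dif_pos h]
    rw [ih (by simp [hsf, hg]) (by simp [hsf, hb])]
    rw [pvChunksG_step r h, pvChunksG_step g (by omega), pvChunksG_step b (by omega)]
    simp [hsf, hst]
  | case2 r g b rs gs bs h =>
    intro hg hb
    rw [pvBLoop]
    simp only [dif_neg h]
    rw [pvChunksG_nil_of_short r (by omega), pvChunksG_nil_of_short g (by omega),
      pvChunksG_nil_of_short b (by omega)]
    simp

lemma pvFoldFlatten (frame : List (List (List Int))) (init : pvAState) :
    frame.foldl (fun acc row => row.foldl pvStepA acc) init =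
      (frame.flatten).foldl pvStepA init := by
  induction frame generalizing init with
  | nil => simp
  | cons r t ih => simp [List.foldl_append, ih]

-- ===== VERDICT (by name: the statement is the Claim_ definition above) =====
theorem change_format_spec : Claim_equal_change_format := by
  intro frame _ _
  unfold Spec_change_format change_format change_format_alt
  dsimp only
  rw [pvFoldFlatten, pvFoldA]
  have hfm : frame.flatMap (fun row => row) = frame.flatten := by simp
  rw [hfm, pvBLoop_eq _ _ _ _ _ _ (by simp [Function.comp_def]) (by simp [Function.comp_def])]
  simp only [List.nil_append]
  rw [pvChunks_eq_chunksG 0, pvChunks_eq_chunksG 1, pvChunks_eq_chunksG 2]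
  rw [pvFinalLoop _ _ _ (by simp [pvChunksG, pvChan, Function.comp_def]) (by simp [pvChunksG, pvChan, Function.comp_def])]
  simp [pvChan]
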